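-- pv_equiv track=rewrite | github.com/mo124121/atcoder-activity | python/other/ABC259E.py | solve
-- ===== SOURCE A (Python) =====
-- def solve(N, MPE):
--     count = {}
--     for i in range(N):
--         for p, e in MPE[i]:
--             if p not in count:
--                 count[p] = (0, False)
--             if count[p][0] < e:
--                 count[p] = (e, True)
--             elif count[p][0] == e:
--                 count[p] = (e, False)
--
--     ret = 0
--     no_dec = False
--     for i in range(N):
--         flag = False
--         for p, e in MPE[i]:
--             if count[p][0] == e and count[p][1]:
--                 flag = True
--                 break
--         if flag:
--             ret += 1
--         else:
--             no_dec = True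
--     if no_dec:
--         ret += 1
--
--     return ret
-- ===== SOURCE B (Python) =====
-- def solve(N, MPE):
--     # An entry (p, e) is a "unique maximum" for its prime iff exactly one entry
--     # with prime p (itself) has exponent >= e; a positive unique maximum makes
--     # its number critical.  Count critical numbers directly by this quadratic
--     # test over the flattened entry list; the +1 for a droppable number falls
--     # out as c < N.  No dictionaries at all.
--     entries = [pe for i in range(N) for pe in MPE[i]]
--     c = sum(
--         1 for i in range(N)
--         if any(e > 0 and sum(1 for q, f in entries if q == p and f >= e) == 1
--                for p, e in MPE[i])
--     )
--     return c + (1 if c < N else 0)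
-- ===== Notes on version B (the rewrite author's own statement) =====
-- stated objective: simpler
-- what changed: Replaces A's dict of (max-exponent, uniquely-attained) toggle pairs and its no_dec flag with a direct quadratic test on the flattened entry list ('exactly one entry with this prime has exponent >= e') and derives the final +1 from c < N.
import Mathlib
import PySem

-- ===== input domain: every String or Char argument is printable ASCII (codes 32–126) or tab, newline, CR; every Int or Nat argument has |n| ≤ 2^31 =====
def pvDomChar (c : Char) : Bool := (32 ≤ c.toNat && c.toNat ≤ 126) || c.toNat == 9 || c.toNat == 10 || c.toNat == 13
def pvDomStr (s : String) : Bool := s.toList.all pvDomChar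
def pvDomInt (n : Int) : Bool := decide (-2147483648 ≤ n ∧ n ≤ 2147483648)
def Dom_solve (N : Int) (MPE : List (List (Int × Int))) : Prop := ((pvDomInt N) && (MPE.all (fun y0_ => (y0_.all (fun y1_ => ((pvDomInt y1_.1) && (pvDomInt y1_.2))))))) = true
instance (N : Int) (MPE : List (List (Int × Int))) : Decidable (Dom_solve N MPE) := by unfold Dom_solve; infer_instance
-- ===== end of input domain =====

-- B drops A's dict of (max-exponent, uniquely-attained) toggles entirely: it tests each entry
-- (p, e) directly by a quadratic scan ("exactly one entry with prime p has exponent ≥ e"),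
-- and derives the +1 for a droppable number from c < N instead of a no_dec flag.

-- ===== PORT A =====
-- one inner-loop iteration of A's first pass (the count-dict update)
def solveAEntry (count : PySem.Dict Int (Int × Bool)) (pe : Int × Int) : PySem.Dict Int (Int × Bool) :=
  let count1 := if count.contains pe.1 then count else count.insert pe.1 ((0 : Int), false)
  let c := (count1.get? pe.1).getD ((0 : Int), false)  -- key present here, getD is exact
  if c.1 < pe.2 then count1.insert pe.1 (pe.2, true)
  else if c.1 = pe.2 then count1.insert pe.1 (pe.2, false)
  else count1

def solve (N : Int) (MPE : List (List (Int × Int))) : Int :=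
  -- MPE[i]: pyGet? is some for every i in range(N) under Pre_solve, so getD [] is exact there
  let count := (PySem.List.pyRange 0 N 1).foldl
      (fun d i => ((PySem.List.pyGet? MPE i).getD []).foldl solveAEntry d) PySem.Dict.empty
  let rn := (PySem.List.pyRange 0 N 1).foldl
      (fun (rn : Int × Bool) i =>
        let flag := ((PySem.List.pyGet? MPE i).getD []).any (fun pe =>  -- for-with-break setting flag = any
          let c := (count.get? pe.1).getD ((0 : Int), false)  -- count[p]: key present here, getD exact
          decide (c.1 = pe.2) && c.2)
        if flag then (rn.1 + 1, rn.2) else (rn.1, true)) ((0 : Int), false)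
  if rn.2 then rn.1 + 1 else rn.1

-- ===== PORT B =====
def solve_alt (N : Int) (MPE : List (List (Int × Int))) : Int :=
  -- entries = [pe for i in range(N) for pe in MPE[i]]
  let entries := (PySem.List.pyRange 0 N 1).foldl
      (fun acc i => acc ++ (PySem.List.pyGet? MPE i).getD []) []
  -- c = sum(1 for i in range(N) if any(e > 0 and sum(1 for q, f in entries if q == p and f >= e) == 1 for p, e in MPE[i]))
  let c := (PySem.List.pyRange 0 N 1).foldl
      (fun (c : Int) i =>
        if ((PySem.List.pyGet? MPE i).getD []).any (fun pe =>
              decide (0 < pe.2) &&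
              decide ((entries.foldl (fun (k : Int) qf =>
                  if qf.1 = pe.1 ∧ pe.2 ≤ qf.2 then k + 1 else k) (0 : Int)) = 1))
        then c + 1 else c) (0 : Int)
  c + (if c < N then 1 else 0)

-- ===== PRECONDITION & SPEC =====
-- Pre_ excludes exactly the inputs with N > len(MPE), where A raises IndexError.
def Pre_solve (N : Int) (MPE : List (List (Int × Int))) : Prop := N ≤ (MPE.length : Int)
instance (N : Int) (MPE : List (List (Int × Int))) : Decidable (Pre_solve N MPE) := by unfold Pre_solve; infer_instance
def pvWitness_solve : Int × (List (List (Int × Int))) := (2, [[(2, 1)], [(2, 1), (3, 2)]])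

def Spec_solve (N : Int) (MPE : List (List (Int × Int))) (out : Int) : Prop := out = solve_alt N MPE
instance (N : Int) (MPE : List (List (Int × Int))) (out : Int) : Decidable (Spec_solve N MPE out) := by unfold Spec_solve; infer_instance

-- ===== CLAIM (what is proved, stated in full; the proofs are below) =====
def Claim_equal_solve : Prop := ∀ (N : Int) (MPE : List (List (Int × Int))), Dom_solve N MPE → Pre_solve N MPE → Spec_solve N MPE (solve N MPE)

-- ===== LEMMAS AND PROOFS =====

-- a loop of loops is a loop over the concatenation
theorem foldl_inner_flatten {α β γ : Type} (f : γ → α → γ) (g : β → List α) :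
    ∀ (l : List β) (d : γ),
      l.foldl (fun d b => (g b).foldl f d) d = ((l.map g).flatten).foldl f d := by
  intro l
  induction l with
  | nil => intro d; rfl
  | cons b l ih => intro d; simp [List.foldl_append, ih]

-- a dict-building loop, observed at one key p, is a scalar fold over the entries keyed p
theorem get?_foldl_localize {ν : Type} (p : Int)
    (upd : PySem.Dict Int ν → Int × Int → PySem.Dict Int ν)
    (f : Option ν → Int → Option ν)
    (h : ∀ d q e, (upd d (q, e)).get? p = if q = p then f (d.get? p) e else d.get? p) :
    ∀ (S : List (Int × Int)) (d : PySem.Dict Int ν),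
      (S.foldl upd d).get? p
        = ((S.filter (fun pe => pe.1 = p)).map Prod.snd).foldl f (d.get? p) := by
  intro S
  induction S with
  | nil => intro d; rfl
  | cons pe S ih =>
    intro d
    obtain ⟨q, e⟩ := pe
    rw [List.foldl_cons, ih, h]
    by_cases hq : q = p
    · simp [hq]
    · simp [hq]

-- scalar version of A's dict update
def fA : Option (Int × Bool) → Int → Option (Int × Bool) := fun o e =>
  let c := o.getD ((0 : Int), false)
  if c.1 < e then some (e, true) else if c.1 = e then some (e, false) else some c

theorem hA_local (p : Int) (d : PySem.Dict Int (Int × Bool)) (q e : Int) :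
    (solveAEntry d (q, e)).get? p = if q = p then fA (d.get? p) e else d.get? p := by
  unfold solveAEntry fA
  have hget : ∀ (d' : PySem.Dict Int (Int × Bool)) v,
      (d'.insert q v).get? p = if q = p then some v else d'.get? p := by
    intro d' v
    rw [PySem.Dict.get?_insert]
    rcases eq_or_ne q p with rfl | hq
    · simp
    · simp [hq, Ne.symm hq]
  by_cases hc : d.contains q
  · have hs : (d.get? q).isSome := by
      rw [← PySem.Dict.contains_eq_isSome_get?]; exact hc
    obtain ⟨c0, hc0⟩ := Option.isSome_iff_exists.mp hs
    simp only [hc, if_true, hc0, Option.getD_some]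
    by_cases hq : q = p
    · subst hq
      simp only [hc0, Option.getD_some, if_pos rfl]
      split_ifs <;> simp_all [hget]
    · simp only [if_neg hq]
      split_ifs <;> simp_all [hget]
  · have h0 : d.get? q = none := by
      rw [PySem.Dict.get?_eq_none_iff_contains]
      simpa using hc
    simp only [hc, if_false]
    have hgq : (d.insert q ((0 : Int), false)).get? q = some ((0 : Int), false) := by
      simp [PySem.Dict.get?_insert_self]
    by_cases hq : q = p
    · subst hq
      simp only [hgq, Option.getD_some, if_pos rfl, h0, Option.getD_none]
      split_ifs <;> simp_all [hget]
    · simp only [if_neg hq, hgq, Option.getD_some]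
      have hne : (d.insert q ((0 : Int), false)).get? p = d.get? p := by
        rw [hget]; simp [hq]
      split_ifs <;> simp_all [hget]

-- the running maximum (seeded with 0, as A's dict effectively does)
def mx (es : List Int) : Int := es.foldl max 0

theorem mx_append (ys : List Int) (e : Int) : mx (ys ++ [e]) = max (mx ys) e := by
  simp [mx, List.foldl_append]

theorem mx_nonneg (es : List Int) : 0 ≤ mx es := by
  induction es using List.reverseRecOn with
  | nil => simp [mx]
  | append_singleton ys e ih => rw [mx_append]; exact le_trans ih (le_max_left _ _)

theorem le_mx (es : List Int) (x : Int) (hx : x ∈ es) : x ≤ mx es := by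
  induction es using List.reverseRecOn with
  | nil => cases hx
  | append_singleton ys e ih =>
    rw [mx_append]
    rcases List.mem_append.mp hx with h | h
    · exact le_trans (ih h) (le_max_left _ _)
    · simp at h; subst h; exact le_max_right _ _

theorem mx_pos_mem (es : List Int) (h : 0 < mx es) : mx es ∈ es := by
  induction es using List.reverseRecOn with
  | nil => simp [mx] at h
  | append_singleton ys e ih =>
    rw [mx_append] at h ⊢
    rcases le_total (mx ys) e with he | he
    · rw [max_eq_right he]; simp
    · rw [max_eq_left he] at h ⊢
      exact List.mem_append.mpr (Or.inl (ih h))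

theorem scalarA (es : List Int) :
    es.foldl fA none
      = if es = [] then none
        else some (mx es, decide (0 < mx es ∧ es.count (mx es) = 1)) := by
  induction es using List.reverseRecOn with
  | nil => rfl
  | append_singleton ys e ih =>
    rw [List.foldl_append]
    rcases eq_or_ne ys [] with hys | hys
    · subst hys
      simp only [List.foldl_nil, List.nil_append]
      show fA none e = _
      unfold fA
      have hne1 : ([e] : List Int) ≠ [] := by simp
      rcases lt_trichotomy 0 e with h | h | h
      · have hme : mx [e] = e := by simp [mx]; omega
        rw [if_neg hne1]
        simp only [List.nil_append, hme]
        simp [h, List.count_singleton]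
      · subst h
        have hme : mx [(0 : Int)] = 0 := by simp [mx]
        rw [if_neg hne1]
        simp only [List.nil_append, hme]
        simp
      · have hme : mx [e] = 0 := by simp [mx]; omega
        rw [if_neg hne1]
        simp only [List.nil_append, hme]
        have h1 : ¬ ((0 : Int) < e) := by omega
        have h2 : ¬ ((0 : Int) = e) := by omega
        have h3 : ¬ ((0 : Int) < 0 ∧ List.count (0 : Int) [e] = 1) := by simp
        simp [h1, h2, h3]
    · rw [ih, if_neg hys]
      have hne : ys ++ [e] ≠ [] := by simp
      rw [if_neg hne, mx_append]
      unfold fA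
      simp only [Option.getD_some]
      rcases lt_trichotomy (mx ys) e with h | h | h
      · -- new strict maximum
        have hmax : max (mx ys) e = e := max_eq_right (le_of_lt h)
        have hepos : 0 < e := lt_of_le_of_lt (mx_nonneg ys) h
        have hnot : e ∉ ys := fun hm => absurd (le_mx ys e hm) (not_le.mpr h)
        have hcount : (ys ++ [e]).count e = 1 := by
          rw [List.count_append]
          simp [List.count_eq_zero.mpr hnot, List.count_singleton]
        simp [h, hmax, hepos, hcount]
      · -- ties the maximum
        subst h
        have hflag : ¬(0 < mx ys ∧ (ys ++ [mx ys]).count (mx ys) = 1) := by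
          rintro ⟨hp, hc⟩
          have hmem := mx_pos_mem ys hp
          have h1 : 1 ≤ ys.count (mx ys) := List.one_le_count_iff.mpr hmem
          rw [List.count_append, List.count_singleton] at hc
          simp at hc
          omega
        rw [max_self, decide_eq_false hflag]
        simp
      · -- below the maximum: nothing changes
        have hmax : max (mx ys) e = mx ys := max_eq_left (le_of_lt h)
        have hcount : (ys ++ [e]).count (mx ys) = ys.count (mx ys) := by
          rw [List.count_append, List.count_singleton]
          simp [ne_of_lt h]
        simp [not_lt_of_gt h, ne_of_gt h, hmax, hcount]

-- the entry stream and its per-prime exponent list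
def esOf (S : List (Int × Int)) (p : Int) : List Int :=
  (S.filter (fun pe => pe.1 = p)).map Prod.snd

theorem mem_esOf {S : List (Int × Int)} {p e : Int} (h : (p, e) ∈ S) : e ∈ esOf S p := by
  unfold esOf
  exact List.mem_map.mpr ⟨(p, e), List.mem_filter.mpr ⟨h, by simp⟩, rfl⟩

-- two distinct members force length ≥ 2
theorem two_mem_length {α : Type} {l : List α} {a b : α}
    (ha : a ∈ l) (hb : b ∈ l) (hab : a ≠ b) : 2 ≤ l.length := by
  induction l with
  | nil => cases ha
  | cons x xs ih =>
    rcases List.mem_cons.mp ha with rfl | ha' <;> rcases List.mem_cons.mp hb with h | hb'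
    · exact absurd h.symm hab
    · have := List.length_pos_of_mem hb'; simp; omega
    · subst h; have := List.length_pos_of_mem ha'; simp; omega
    · have := ih ha' hb'; simp; omega

-- the scalar heart: "exactly one entry ≥ e, with e positive" = "e is the uniquely attained positive maximum"
theorem uniqmax (es : List Int) (e : Int) (he : e ∈ es) :
    ((0 < e ∧ es.countP (fun f => decide (e ≤ f)) = 1)
      ↔ (mx es = e ∧ 0 < mx es ∧ es.count (mx es) = 1)) := by
  constructor
  · rintro ⟨h0, h1⟩
    have hle : e ≤ mx es := le_mx es e he
    have hme : mx es = e := by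
      by_contra hne
      have hlt : e < mx es := lt_of_le_of_ne hle (fun h => hne h.symm)
      have hpos : 0 < mx es := lt_trans h0 hlt
      have hm : mx es ∈ es := mx_pos_mem es hpos
      -- both e and mx es land in the ≥-e filter, so countP ≥ 2
      have h2 : 2 ≤ es.countP (fun f => decide (e ≤ f)) := by
        rw [List.countP_eq_length_filter]
        refine two_mem_length (l := es.filter (fun f => decide (e ≤ f)))
          (List.mem_filter.mpr ⟨he, by simp⟩)
          (List.mem_filter.mpr ⟨hm, by simp [le_of_lt hlt]⟩) (ne_of_lt hlt)
      omega
    refine ⟨hme, hme ▸ h0, ?_⟩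
    rw [hme]
    have hge : 1 ≤ es.count e := List.one_le_count_iff.mpr he
    have hle' : es.count e ≤ es.countP (fun f => decide (e ≤ f)) := by
      rw [List.count]
      exact List.countP_mono_left (fun x _ hx => by
        simp at hx ⊢; omega)
    omega
  · rintro ⟨hme, h0, hc⟩
    refine ⟨hme ▸ h0, ?_⟩
    have : es.countP (fun f => decide (e ≤ f)) = es.count e := by
      rw [List.count]
      apply List.countP_congr
      intro x hx
      have := le_mx es x hx
      simp
      constructor
      · intro h; omega
      · intro h; omega
    rw [this, ← hme, hc]

-- pointwise equality of A's row predicate and B's quadratic row predicate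
theorem pred_eq (S : List (Int × Int)) (p e : Int) (hmem : (p, e) ∈ S) :
    (let c := (((S.foldl solveAEntry PySem.Dict.empty).get? p).getD ((0 : Int), false))
     decide (c.1 = e) && c.2)
    = (decide (0 < e) &&
        decide ((S.foldl (fun (k : Int) qf =>
            if qf.1 = p ∧ e ≤ qf.2 then k + 1 else k) (0 : Int)) = 1)) := by
  have hes : esOf S p ≠ [] := fun h => by
    have := mem_esOf hmem; rw [h] at this; cases this
  have hA : (S.foldl solveAEntry PySem.Dict.empty).get? p
      = some (mx (esOf S p), decide (0 < mx (esOf S p) ∧ (esOf S p).count (mx (esOf S p)) = 1)) := by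
    rw [get?_foldl_localize p solveAEntry fA (fun d q e => hA_local p d q e) S PySem.Dict.empty]
    show (esOf S p).foldl fA none = _
    rw [scalarA, if_neg hes]
  -- B's inner scan is a countP over S, which localizes to esOf S p
  have hB : (S.foldl (fun (k : Int) qf =>
        if qf.1 = p ∧ e ≤ qf.2 then k + 1 else k) (0 : Int))
      = ((esOf S p).countP (fun f => decide (e ≤ f)) : Int) := by
    rw [PySem.List.foldl_ite_add_one]
    have : S.countP (fun qf => decide (qf.1 = p ∧ e ≤ qf.2))
        = (esOf S p).countP (fun f => decide (e ≤ f)) := by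
      unfold esOf
      rw [List.countP_map, List.countP_filter]
      apply List.countP_congr
      intro qf _
      simp [Function.comp, and_comm]
    rw [this]
    omega
  rw [hA, hB]
  simp only [Option.getD_some, ← Bool.decide_and]
  rw [decide_eq_decide]
  have hu := uniqmax (esOf S p) e (mem_esOf hmem)
  constructor
  · rintro ⟨h1, h2, h3⟩
    have h4 := hu.mpr ⟨h1, h2, h3⟩
    exact ⟨h4.1, by omega⟩
  · rintro ⟨h0, hc⟩
    have hc' : (esOf S p).countP (fun f => decide (e ≤ f)) = 1 := by omega
    exact hu.mp ⟨h0, hc'⟩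

-- the (ret, no_dec) pair of A's second loop, in closed form
theorem foldl_flag_pair (flag : Int → Bool) :
    ∀ (l : List Int) (r : Int) (b : Bool),
      l.foldl (fun (rn : Int × Bool) i =>
          if flag i then (rn.1 + 1, rn.2) else (rn.1, true)) (r, b)
        = (r + (l.countP flag : Int), b || !l.all flag) := by
  intro l
  induction l with
  | nil => intro r b; simp
  | cons x xs ih =>
    intro r b
    rw [List.foldl_cons]
    by_cases hx : flag x
    · rw [if_pos hx, ih]
      simp [List.countP_cons, hx, List.all_cons]
      try omega
    · rw [if_neg hx, ih]
      simp [List.countP_cons, hx, List.all_cons]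
      try omega

-- A's (ret, no_dec) pair fold and B's count-plus-comparison agree for any row flag
theorem flag_count (N : Int) (l : List Int) (flag : Int → Bool) (hlen : l.length = N.toNat) :
    (if (l.foldl (fun (rn : Int × Bool) i =>
          if flag i then (rn.1 + 1, rn.2) else (rn.1, true)) ((0 : Int), false)).2
     then (l.foldl (fun (rn : Int × Bool) i =>
          if flag i then (rn.1 + 1, rn.2) else (rn.1, true)) ((0 : Int), false)).1 + 1
     else (l.foldl (fun (rn : Int × Bool) i =>
          if flag i then (rn.1 + 1, rn.2) else (rn.1, true)) ((0 : Int), false)).1)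
    = (l.foldl (fun (c : Int) i => if flag i then c + 1 else c) (0 : Int))
      + (if (l.foldl (fun (c : Int) i => if flag i then c + 1 else c) (0 : Int)) < N
         then 1 else 0) := by
  rw [foldl_flag_pair, PySem.List.foldl_if_add_one]
  simp only [Bool.false_or, zero_add]
  have hlecnt : l.countP flag ≤ N.toNat := by
    rw [← hlen]; exact List.countP_le_length
  have hiff : (l.all flag = true) ↔ ¬ ((l.countP flag : Int) < N) := by
    rw [List.all_eq_true]
    constructor
    · intro hall
      have : l.countP flag = l.length := List.countP_eq_length.mpr (fun a ha => hall a ha)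
      rw [this, hlen]
      omega
    · intro hnl
      have : l.countP flag = l.length := by rw [hlen]; omega
      intro a ha
      exact List.countP_eq_length.mp this a ha
  by_cases hall : l.all flag
  · have h1 : ¬ ((l.countP flag : Int) < N) := hiff.mp hall
    simp [hall, h1]
  · have h1 : (l.countP flag : Int) < N := by
      by_contra hc
      exact hall (hiff.mpr hc)
    simp [hall, h1]

-- ===== VERDICT (by name: the statement is the Claim_ definition above) =====
theorem solve_spec : Claim_equal_solve := by
  intro N MPE _ _
  unfold Spec_solve solve solve_alt
  -- B's entries list is the flattened row stream, the same S that A's dict pass consumes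
  rw [PySem.List.foldl_append_eq_flatMap]
  rw [List.flatMap_def]
  set rows : List (List (Int × Int)) :=
    (PySem.List.pyRange 0 N 1).map (fun i => (PySem.List.pyGet? MPE i).getD []) with hrows
  have hflat : ∀ {γ : Type} (f : γ → Int × Int → γ) (d : γ),
      (PySem.List.pyRange 0 N 1).foldl (fun d i => ((PySem.List.pyGet? MPE i).getD []).foldl f d) d
        = rows.flatten.foldl f d := by
    intro γ f d
    rw [foldl_inner_flatten f (fun i => (PySem.List.pyGet? MPE i).getD []) _ d, hrows]
  simp only [hflat, List.nil_append]
  set S := rows.flatten with hS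
  -- both row predicates agree on every row of the range
  have hcongr : (PySem.List.pyRange 0 N 1).foldl
      (fun (rn : Int × Bool) i =>
        let flag := ((PySem.List.pyGet? MPE i).getD []).any (fun pe =>
          let c := ((S.foldl solveAEntry PySem.Dict.empty).get? pe.1).getD ((0 : Int), false)
          decide (c.1 = pe.2) && c.2)
        if flag then (rn.1 + 1, rn.2) else (rn.1, true)) ((0 : Int), false)
      = (PySem.List.pyRange 0 N 1).foldl
      (fun (rn : Int × Bool) i =>
        if ((PySem.List.pyGet? MPE i).getD []).any (fun pe =>
            decide (0 < pe.2) &&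
            decide ((S.foldl (fun (k : Int) qf =>
                if qf.1 = pe.1 ∧ pe.2 ≤ qf.2 then k + 1 else k) (0 : Int)) = 1))
        then (rn.1 + 1, rn.2) else (rn.1, true)) ((0 : Int), false) := by
    apply PySem.List.foldl_congr_mem
    intro rn i hi
    have hrow : (PySem.List.pyGet? MPE i).getD [] ∈ rows := by
      rw [hrows]; exact List.mem_map.mpr ⟨i, hi, rfl⟩
    have hany : ((PySem.List.pyGet? MPE i).getD []).any (fun pe =>
          let c := ((S.foldl solveAEntry PySem.Dict.empty).get? pe.1).getD ((0 : Int), false)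
          decide (c.1 = pe.2) && c.2)
        = ((PySem.List.pyGet? MPE i).getD []).any (fun pe =>
            decide (0 < pe.2) &&
            decide ((S.foldl (fun (k : Int) qf =>
                if qf.1 = pe.1 ∧ pe.2 ≤ qf.2 then k + 1 else k) (0 : Int)) = 1)) := by
      apply PySem.List.any_congr_mem
      intro pe hpe
      have hmemS : (pe.1, pe.2) ∈ S := by
        rw [hS]
        exact List.mem_flatten.mpr ⟨(PySem.List.pyGet? MPE i).getD [], hrow, by simpa using hpe⟩
      exact pred_eq S pe.1 pe.2 hmemS
    rw [hany]
  rw [hcongr]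
  exact flag_count N (PySem.List.pyRange 0 N 1)
    (fun i => ((PySem.List.pyGet? MPE i).getD []).any (fun pe =>
      decide (0 < pe.2) &&
      decide ((S.foldl (fun (k : Int) qf =>
          if qf.1 = pe.1 ∧ pe.2 ≤ qf.2 then k + 1 else k) (0 : Int)) = 1)))
    (by rw [PySem.List.length_pyRange_one]; omega)
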